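-- pv_equiv track=rewrite | github.com/hertz-hwang/hao | src/public/ll/root_convert.py | convert_ll_div
-- ===== SOURCE A (Python) =====
-- from typing import Dict, List, Tuple
--
-- def tokenize_div_rhs(rhs: str) -> List[Tuple[str, bool]]:
--     """将 ll_div 右侧构形串切分为 token。
--     返回列表：[(token, is_braced)]，其中 is_braced 表示该 token 是否来自 `{...}`。
--     """
--     tokens: List[Tuple[str, bool]] = []
--     i = 0
--     n = len(rhs)
--     while i < n:
--         ch = rhs[i]
--         if ch == "{":
--             j = i + 1
--             # 寻找匹配的 '}'
--             while j < n and rhs[j] != "}":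
--                 j += 1
--             if j < n and rhs[j] == "}":
--                 inner = rhs[i + 1 : j]
--                 tokens.append((inner, True))
--                 i = j + 1
--             else:
--                 # 没有闭合，按单字处理 '{'
--                 tokens.append((ch, False))
--                 i += 1
--         else:
--             tokens.append((ch, False))
--             i += 1
--     return tokens
--
-- def map_one_token(token: str, is_braced: bool, pua_to_alias: Dict[str, str]) -> str:
--     original = token
--     # 先用 PUA 别名表进行“别名 -> PUA”的替换（无论是否花括号）
--     if token in pua_to_alias:
--         token = pua_to_alias[token]
--         # 命中映射：直接返回替换结果（不保留花括号）
--         return token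
--
--     # 未命中映射：
--     #    - 若是 braced，保留原样（含花括号），以免信息丢失；
--     #    - 若不是 braced，返回原字。
--     if is_braced:
--         return "{" + original + "}"
--     return original
--
-- def convert_ll_div(div_lines: List[str], pua_to_alias: Dict[str, str]) -> List[str]:
--     out: List[str] = []
--     for line in div_lines:
--         if not line or "\t" not in line:
--             out.append(line)
--             continue
--         left, rhs = line.split("\t", 1)
--         tokens = tokenize_div_rhs(rhs)
--         mapped_parts: List[str] = []
--         for tok, is_braced in tokens:
--             mapped_parts.append(map_one_token(tok, is_braced, pua_to_alias))
--         out.append(f"{left}\t{''.join(mapped_parts)}")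
--     return out
-- ===== SOURCE B (Python) =====
-- def _convert_line(line, d):
--     if not line or "\t" not in line:
--         return line
--     left, rhs = line.split("\t", 1)
--     parts = []
--     while rhs:
--         if rhs[0] == "{":
--             inner, sep, after = rhs[1:].partition("}")
--             if sep:
--                 parts.append(d.get(inner, "{" + inner + "}"))
--                 rhs = after
--                 continue
--         parts.append(d.get(rhs[0], rhs[0]))
--         rhs = rhs[1:]
--     return left + "\t" + "".join(parts)
--
-- def convert_ll_div(div_lines, pua_to_alias):
--     return [_convert_line(line, pua_to_alias) for line in div_lines]
-- ===== Notes on version B (the rewrite author's own statement) =====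
-- stated objective: simpler
-- what changed: A's three-stage pipeline per line (index-based tokenizer producing (token,is_braced) pairs, then a membership-test-plus-index mapping pass, then a join) is fused into one suffix-consuming pass that uses str.partition to split off each braced token and dict.get with a computed default, so no token list and no second pass exist.
import Mathlib
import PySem

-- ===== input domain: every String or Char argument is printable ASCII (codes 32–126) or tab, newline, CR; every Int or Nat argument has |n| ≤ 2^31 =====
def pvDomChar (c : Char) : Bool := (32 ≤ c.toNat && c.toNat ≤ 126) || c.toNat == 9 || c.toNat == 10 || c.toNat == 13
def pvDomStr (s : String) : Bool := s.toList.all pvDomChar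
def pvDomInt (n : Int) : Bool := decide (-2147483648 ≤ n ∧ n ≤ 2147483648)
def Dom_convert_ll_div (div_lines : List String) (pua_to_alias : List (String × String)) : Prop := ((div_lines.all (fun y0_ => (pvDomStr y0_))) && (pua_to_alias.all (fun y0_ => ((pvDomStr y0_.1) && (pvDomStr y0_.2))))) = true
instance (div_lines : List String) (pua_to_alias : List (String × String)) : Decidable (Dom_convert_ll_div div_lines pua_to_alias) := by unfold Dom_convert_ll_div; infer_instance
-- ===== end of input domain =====

-- B fuses A's tokenize/map/join pipeline into one suffix-consuming pass per line (simpler, same cost);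
-- equivalence of the return values is proved below.

-- ===== PORT A =====
-- inner while loop of tokenize_div_rhs: 'while j < n and rhs[j] != "}": j += 1'
def pvFindClose (cs : List Char) (j : Nat) : Nat :=
  if h : j < cs.length then
    if cs[j] = '}' then j else pvFindClose cs (j + 1)
  else j
termination_by cs.length - j
decreasing_by exact Nat.sub_succ_lt_self _ _ h

-- termination fact the outer tokenizer loop needs: j only moves forward
theorem pvFindClose_ge (cs : List Char) (j : Nat) : j ≤ pvFindClose cs j := by
  unfold pvFindClose
  split
  · split
    · exact le_refl j
    · exact le_trans (Nat.le_succ j) (pvFindClose_ge cs (j + 1))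
  · exact le_refl j
termination_by cs.length - j
decreasing_by exact Nat.sub_succ_lt_self _ _ (by assumption)

-- outer while loop of tokenize_div_rhs, state = index i
def pvTokenize (cs : List Char) (i : Nat) : List (List Char × Bool) :=
  if h : i < cs.length then
    let ch := cs[i]
    if ch = '{' then
      let j := pvFindClose cs (i + 1)
      if hj : j < cs.length then
        if cs[j] = '}' then
          (PySem.List.slice cs (some ((i : Int) + 1)) (some (j : Int)), true) :: pvTokenize cs (j + 1)
        else ([ch], false) :: pvTokenize cs (i + 1)
      else ([ch], false) :: pvTokenize cs (i + 1)
    else ([ch], false) :: pvTokenize cs (i + 1)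
  else []
termination_by cs.length - i
decreasing_by
  · exact Nat.sub_lt_sub_left h (Nat.lt_succ_of_le (Nat.le_of_succ_le (pvFindClose_ge cs (i + 1))))
  · exact Nat.sub_succ_lt_self _ _ h
  · exact Nat.sub_succ_lt_self _ _ h
  · exact Nat.sub_succ_lt_self _ _ h

-- map_one_token
def pvMapOne (tok : List Char) (braced : Bool) (d : PySem.Dict String String) : List Char :=
  if PySem.Dict.contains d (String.ofList tok) then
    (PySem.Dict.getD d (String.ofList tok) "").toList
  else if braced then '{' :: tok ++ ['}'] else tok

def convert_ll_div (div_lines : List String) (pua_to_alias : List (String × String)) : List String :=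
  let d := PySem.Dict.mk pua_to_alias
  div_lines.foldl (fun out line =>
    if line.toList = [] ∨ PySem.Str.isIn "\t" line = false then out ++ [line]
    else
      match PySem.Str.splitMax? line "\t" 1 with
      | some (left :: rhs :: _) =>
          out ++ [String.ofList (left.toList ++ '\t' ::
            PySem.Chars.join [] ((pvTokenize rhs.toList 0).map (fun t => pvMapOne t.1 t.2 d)))]
      | _ => out ++ [line]) []

-- ===== PORT B =====
-- the fused while loop of _convert_line, state = remaining suffix of rhs
def pvEmit (d : PySem.Dict String String) (cs : List Char) : List Char :=
  match cs with
  | [] => []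
  | c :: rest =>
    if c = '{' then
      let inner := rest.takeWhile (fun x => x ≠ '}')
      if inner.length < rest.length then
        (PySem.Dict.getD d (String.ofList inner) (String.ofList ('{' :: inner ++ ['}']))).toList
          ++ pvEmit d (rest.drop (inner.length + 1))
      else (PySem.Dict.getD d (String.ofList [c]) (String.ofList [c])).toList ++ pvEmit d rest
    else (PySem.Dict.getD d (String.ofList [c]) (String.ofList [c])).toList ++ pvEmit d rest
termination_by cs.length
decreasing_by
  · exact Nat.lt_succ_of_le (le_trans (Nat.le_of_eq List.length_drop) (Nat.sub_le _ _))
  · exact Nat.lt_succ_self _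
  · exact Nat.lt_succ_self _

def pvConvertLine (line : String) (d : PySem.Dict String String) : String :=
  if line.toList = [] ∨ PySem.Str.isIn "\t" line = false then line
  else
    match PySem.Str.splitMax? line "\t" 1 with
    | none => line
    | some parts =>
      match parts with
      | [] => line
      | [_] => line
      | left :: rhs :: _ => String.ofList (left.toList ++ '\t' :: pvEmit d rhs.toList)

def convert_ll_div_alt (div_lines : List String) (pua_to_alias : List (String × String)) : List String :=
  div_lines.map (fun line => pvConvertLine line (PySem.Dict.mk pua_to_alias))

-- ===== PRECONDITION & SPEC =====
def Spec_convert_ll_div (div_lines : List String) (pua_to_alias : List (String × String)) (out : List String) : Prop := out = convert_ll_div_alt div_lines pua_to_alias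
instance (div_lines : List String) (pua_to_alias : List (String × String)) (out : List String) : Decidable (Spec_convert_ll_div div_lines pua_to_alias out) := by unfold Spec_convert_ll_div; infer_instance

-- ===== CLAIM (what is proved, stated in full; the proofs are below) =====
def Claim_equal_convert_ll_div : Prop := ∀ (div_lines : List String) (pua_to_alias : List (String × String)), Dom_convert_ll_div div_lines pua_to_alias → Spec_convert_ll_div div_lines pua_to_alias (convert_ll_div div_lines pua_to_alias)

-- ===== LEMMAS AND PROOFS =====

theorem pvJoinNil (ps : List (List Char)) : PySem.Chars.join [] ps = ps.flatten := by
  simp only [PySem.Chars.join]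
  unfold List.intercalate
  induction ps with
  | nil => rfl
  | cons a t ih => cases t <;> simp_all [List.intersperse]

-- pvFindClose stops on a '}' whenever it stops inside the string
theorem pvFindClose_close (cs : List Char) (j : Nat) (h : pvFindClose cs j < cs.length) :
    cs[pvFindClose cs j]? = some '}' := by
  by_cases h1 : j < cs.length
  · by_cases hc : cs[j] = '}'
    · rw [pvFindClose, dif_pos h1, if_pos hc, List.getElem?_eq_getElem h1, hc]
    · rw [pvFindClose, dif_pos h1, if_neg hc] at h ⊢
      exact pvFindClose_close cs (j + 1) h
  · rw [pvFindClose, dif_neg h1] at h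
    omega
termination_by cs.length - j
decreasing_by exact Nat.sub_succ_lt_self _ _ h1

-- pvFindClose scans exactly past the non-'}' prefix
theorem pvFindClose_eq (cs : List Char) (j : Nat) (hj : j ≤ cs.length) :
    pvFindClose cs j = j + ((cs.drop j).takeWhile (fun x => x ≠ '}')).length := by
  by_cases h1 : j < cs.length
  · by_cases hc : cs[j] = '}'
    · rw [pvFindClose, dif_pos h1, if_pos hc, List.drop_eq_getElem_cons h1, List.takeWhile_cons]
      simp [hc]
    · rw [pvFindClose, dif_pos h1, if_neg hc, pvFindClose_eq cs (j + 1) (by omega),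
        List.drop_eq_getElem_cons h1, List.takeWhile_cons]
      simp [hc]
      omega
  · have h2 : j = cs.length := by omega
    rw [pvFindClose, dif_neg h1]
    simp [h2]
termination_by cs.length - j
decreasing_by exact Nat.sub_succ_lt_self _ _ h1

-- A's membership-then-index lookup equals B's get-with-default
theorem pvMapOne_eq_getD (tok : List Char) (braced : Bool) (d : PySem.Dict String String) :
    pvMapOne tok braced d =
      (PySem.Dict.getD d (String.ofList tok)
        (String.ofList (if braced then '{' :: tok ++ ['}'] else tok))).toList := by
  unfold pvMapOne
  rw [PySem.Dict.contains_eq_isSome_get?]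
  cases hg : PySem.Dict.get? d (String.ofList tok) with
  | some v => simp [PySem.Dict.getD_of_get?_eq_some _ _ hg]
  | none =>
      simp only [PySem.Dict.getD_of_get?_eq_none _ _ hg, Option.isSome_none, Bool.false_eq_true,
        if_false]
      split <;> simp

-- the heart: A's tokenize-map-join from index i equals B's fused pass over the suffix cs.drop i
theorem pvTokenize_map_eq_emit (d : PySem.Dict String String) (cs : List Char) (i : Nat) :
    ((pvTokenize cs i).map (fun t => pvMapOne t.1 t.2 d)).flatten = pvEmit d (cs.drop i) := by
  induction i using pvTokenize.induct cs with
  | case1 x h ch hb j hj hc ih =>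
    -- '{' with a closing '}' at j = pvFindClose cs (x+1)
    have hx1 : x + 1 ≤ cs.length := by omega
    have hfc : pvFindClose cs (x + 1) = x + 1 + ((cs.drop (x + 1)).takeWhile (fun c => c ≠ '}')).length :=
      pvFindClose_eq cs (x + 1) hx1
    have hj' : pvFindClose cs (x + 1) < cs.length := hj
    have hfc2 : j = x + 1 + ((cs.drop (x + 1)).takeWhile (fun c => c ≠ '}')).length := hfc
    have hpre : (cs.drop (x + 1)).takeWhile (fun c => c ≠ '}') <+: cs.drop (x + 1) :=
      List.takeWhile_prefix _
    have hlt : ((cs.drop (x + 1)).takeWhile (fun c => c ≠ '}')).length < (cs.drop (x + 1)).length := by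
      simp only [List.length_drop]
      omega
    rw [pvTokenize, dif_pos h, if_pos hb, dif_pos hj, if_pos hc]
    rw [List.drop_eq_getElem_cons h, pvEmit, if_pos hb, if_pos hlt]
    simp only [List.map_cons, List.flatten_cons]
    congr 1
    . have hslice : PySem.List.slice cs (some ((x : Int) + 1)) (some ((j : Nat) : Int)) =
          (cs.drop (x + 1)).takeWhile (fun c => c ≠ '}') := by
        have h1 : ((x : Int) + 1) = ((x + 1 : Nat) : Int) := by push_cast; ring
        rw [h1, PySem.List.slice_natCast, hfc2, Nat.add_sub_cancel_left]
        exact (List.prefix_iff_eq_take.mp hpre).symm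
      rw [pvMapOne_eq_getD, hslice]
      simp
    . rw [ih, List.drop_drop, hfc2, Nat.add_assoc]
  | case2 x h ch hb j hj hc ih =>
    -- impossible: pvFindClose stops inside the string only on '}'
    have hcl := pvFindClose_close cs (x + 1) hj
    rw [List.getElem?_eq_getElem hj] at hcl
    exact absurd (Option.some.inj hcl) hc
  | case3 x h ch hb j hj ih =>
    -- unclosed '{': single-character token
    have hx1 : x + 1 ≤ cs.length := by omega
    have hfc : pvFindClose cs (x + 1) = x + 1 + ((cs.drop (x + 1)).takeWhile (fun c => c ≠ '}')).length :=
      pvFindClose_eq cs (x + 1) hx1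
    have hj' : ¬ pvFindClose cs (x + 1) < cs.length := hj
    have hge : ¬ (((cs.drop (x + 1)).takeWhile (fun c => c ≠ '}')).length < (cs.drop (x + 1)).length) := by
      simp only [List.length_drop]
      omega
    rw [pvTokenize, dif_pos h, if_pos hb, dif_neg hj]
    rw [List.drop_eq_getElem_cons h, pvEmit, if_pos hb, if_neg hge]
    simp only [List.map_cons, List.flatten_cons]
    rw [ih, pvMapOne_eq_getD]
    simp
  | case4 x h ch hb ih =>
    rw [pvTokenize, dif_pos h, if_neg hb]
    rw [List.drop_eq_getElem_cons h, pvEmit, if_neg hb]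
    simp only [List.map_cons, List.flatten_cons]
    rw [ih, pvMapOne_eq_getD]
    simp
  | case5 x h =>
    rw [pvTokenize, dif_neg h, List.drop_eq_nil_of_le (by omega)]
    simp [pvEmit]

theorem convert_ll_div_line_eq (line : String) (d : PySem.Dict String String) :
    (if line.toList = [] ∨ PySem.Str.isIn "\t" line = false then line
     else
      match PySem.Str.splitMax? line "\t" 1 with
      | some (left :: rhs :: _) =>
          String.ofList (left.toList ++ '\t' ::
            PySem.Chars.join [] ((pvTokenize rhs.toList 0).map (fun t => pvMapOne t.1 t.2 d)))
      | _ => line) = pvConvertLine line d := by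
  unfold pvConvertLine
  split
  · rfl
  · cases hsp : PySem.Str.splitMax? line "\t" 1 with
    | none => rfl
    | some l =>
      match l with
      | [] => rfl
      | [_] => rfl
      | left :: rhs :: t =>
        simp only
        rw [pvJoinNil, pvTokenize_map_eq_emit d rhs.toList 0]
        rfl

-- ===== VERDICT (by name: the statement is the Claim_ definition above) =====
theorem convert_ll_div_spec : Claim_equal_convert_ll_div := by
  intro div_lines pua_to_alias _
  unfold Spec_convert_ll_div convert_ll_div convert_ll_div_alt
  simp only
  have hbody : ∀ (out : List String) (line : String),
      (if line.toList = [] ∨ PySem.Str.isIn "\t" line = false then out ++ [line]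
       else
        match PySem.Str.splitMax? line "\t" 1 with
        | some (left :: rhs :: _) =>
            out ++ [String.ofList (left.toList ++ '\t' ::
              PySem.Chars.join [] ((pvTokenize rhs.toList 0).map
                (fun t => pvMapOne t.1 t.2 (PySem.Dict.mk pua_to_alias))))]
        | _ => out ++ [line]) = out ++ [pvConvertLine line (PySem.Dict.mk pua_to_alias)] := by
    intro out line
    rw [← convert_ll_div_line_eq line (PySem.Dict.mk pua_to_alias)]
    split
    · rfl
    · cases PySem.Str.splitMax? line "\t" 1 with
      | none => rfl
      | some l => match l with
        | [] => rfl
        | [_] => rfl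
        | _ :: _ :: _ => rfl
  calc div_lines.foldl _ [] = div_lines.foldl (fun out line => out ++ [pvConvertLine line (PySem.Dict.mk pua_to_alias)]) [] := by
        apply PySem.List.foldl_congr_mem
        intro acc line _
        exact hbody acc line
    _ = _ := by
        rw [PySem.List.foldl_append_singleton_eq_map]
        simp
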